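-- pv_equiv track=rewrite | github.com/ArtRiaz/hillel | lessons_08_hw_06/04.py | group_by_surname
-- ===== SOURCE A (Python) =====
-- def group_by_surname(list_of_enrolles):
--    groups = {
--        'A-I': 0,
--        'J-P': 0,
--        'Q-T': 0,
--        'U-Z': 0
--
--    }
--    for i in list_of_enrolles:
--        c = i.split()
--        surname = c[-1]
--        for group in groups:
--            first_litter = group[0]
--            second_litter = group[-1]
--            if first_litter <= surname[0] <= second_litter:
--                groups[group] += 1
--
--    return groups
-- ===== SOURCE B (Python) =====
-- def group_by_surname(list_of_enrolles):
--     names = ['A-I', 'J-P', 'Q-T', 'U-Z']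
--     table = {}
--     for idx, name in enumerate(names):
--         for code in range(ord(name[0]), ord(name[-1]) + 1):
--             table[chr(code)] = idx
--     counts = [0, 0, 0, 0]
--     for e in list_of_enrolles:
--         idx = table.get(e.split()[-1][0])
--         if idx is not None:
--             counts[idx] += 1
--     return {name: counts[i] for i, name in enumerate(names)}
-- ===== Notes on version B (the rewrite author's own statement) =====
-- stated objective: faster
-- what changed: B precomputes a 26-entry letter->bucket-index dict once and keeps a 4-slot count list updated by a single O(1) lookup per enrollee, assembling the result dict at the end, instead of A's per-enrollee scan over the four range keys with per-key string indexing, chained comparisons and in-place dict increments.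
import Mathlib
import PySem

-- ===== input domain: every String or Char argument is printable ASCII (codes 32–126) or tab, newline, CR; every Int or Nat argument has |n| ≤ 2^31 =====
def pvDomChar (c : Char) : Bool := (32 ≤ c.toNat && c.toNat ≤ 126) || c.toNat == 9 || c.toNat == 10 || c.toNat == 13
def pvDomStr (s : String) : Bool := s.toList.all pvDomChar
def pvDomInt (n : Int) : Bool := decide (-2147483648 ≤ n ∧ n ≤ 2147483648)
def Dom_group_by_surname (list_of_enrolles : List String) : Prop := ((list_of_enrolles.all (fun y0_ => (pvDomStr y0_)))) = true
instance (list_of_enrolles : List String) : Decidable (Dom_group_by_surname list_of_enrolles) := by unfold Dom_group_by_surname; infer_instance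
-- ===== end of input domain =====

-- B replaces A's inner 4-way range scan per enrollee with a letter→bucket-index table built once
-- and a 4-slot count list; objective: simpler/alternative structure (return value only; A raises on
-- whitespace-only entries, excluded by Pre_; B raises there too).

-- ===== PORT A =====
-- loop body of A's 'for i in list_of_enrolles'
def pvStepA (groups : PySem.Dict String Int) (i : String) : PySem.Dict String Int :=
  let c := PySem.Str.split₀ i
  match PySem.List.pyGet? c (-1) with
  | none => groups   -- Python raises IndexError here (excluded by Pre_)
  | some surname =>
    groups.keys.foldl (fun g group =>
      match PySem.Str.pyGet? group 0, PySem.Str.pyGet? group (-1), PySem.Str.pyGet? surname 0 with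
      | some fl, some sl, some s0 =>
        if fl ≤ s0 ∧ s0 ≤ sl then g.modify group 0 (· + 1) else g
      | _, _, _ => g) groups

def group_by_surname (list_of_enrolles : List String) : List (String × Int) :=
  (list_of_enrolles.foldl pvStepA
    (PySem.Dict.mk [("A-I", 0), ("J-P", 0), ("Q-T", 0), ("U-Z", 0)])).items

-- ===== PORT B =====
def pvNames : List String := ["A-I", "J-P", "Q-T", "U-Z"]

-- table: every letter in each bucket's range ↦ bucket index (Source B's first double loop)
def pvTable : PySem.Dict Char Int :=
  (PySem.List.enumerate pvNames 0).foldl (fun t p =>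
    match PySem.Str.pyGet? p.2 0, PySem.Str.pyGet? p.2 (-1) with
    | some a, some b =>
      (PySem.List.pyRange (a.toNat : Int) ((b.toNat : Int) + 1) 1).foldl
        (fun t code => t.insert (Char.ofNat code.toNat) p.1) t
    | _, _ => t) PySem.Dict.empty

-- loop body of Source B's 'for e in list_of_enrolles'
def pvStepB (cs : List Int) (e : String) : List Int :=
  match PySem.List.pyGet? (PySem.Str.split₀ e) (-1) with
  | none => cs   -- Python raises IndexError here (excluded by Pre_)
  | some surname =>
    match PySem.Str.pyGet? surname 0 with
    | none => cs
    | some ch =>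
      match pvTable.get? ch with
      | none => cs
      | some idx => PySem.List.pySetD cs idx (PySem.List.pyGetD cs idx 0 + 1)

def group_by_surname_alt (list_of_enrolles : List String) : List (String × Int) :=
  let counts := list_of_enrolles.foldl pvStepB [0, 0, 0, 0]
  (PySem.List.enumerate pvNames 0).map (fun p => (p.2, PySem.List.pyGetD counts p.1 0))

-- ===== PRECONDITION & SPEC =====
-- Pre_ excludes inputs containing an empty or all-whitespace string: there '.split()' is empty and
-- both A and B raise IndexError on c[-1].
def Pre_group_by_surname (list_of_enrolles : List String) : Prop :=
  ∀ s ∈ list_of_enrolles, PySem.Str.split₀ s ≠ []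
instance (list_of_enrolles : List String) : Decidable (Pre_group_by_surname list_of_enrolles) := by
  unfold Pre_group_by_surname; infer_instance
def pvWitness_group_by_surname : List String := ["Ivan Petrov", "Anna Zorina"]

def Spec_group_by_surname (list_of_enrolles : List String) (out : List (String × Int)) : Prop :=
  out = group_by_surname_alt list_of_enrolles
instance (list_of_enrolles : List String) (out : List (String × Int)) :
    Decidable (Spec_group_by_surname list_of_enrolles out) := by
  unfold Spec_group_by_surname; infer_instance

-- ===== CLAIM (what is proved, stated in full; the proofs are below) =====
def Claim_equal_group_by_surname : Prop :=
  ∀ (list_of_enrolles : List String), Dom_group_by_surname list_of_enrolles →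
    Pre_group_by_surname list_of_enrolles →
    Spec_group_by_surname list_of_enrolles (group_by_surname list_of_enrolles)

-- ===== LEMMAS AND PROOFS =====

-- the concrete value of B's table
lemma pvTable_eq : pvTable = PySem.Dict.mk
    [('A',0),('B',0),('C',0),('D',0),('E',0),('F',0),('G',0),('H',0),('I',0),
     ('J',1),('K',1),('L',1),('M',1),('N',1),('O',1),('P',1),
     ('Q',2),('R',2),('S',2),('T',2),
     ('U',3),('V',3),('W',3),('X',3),('Y',3),('Z',3)] := by
  set_option maxRecDepth 40000 in decide

-- first/last characters of the four key strings (A's range bounds)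
lemma pvLit : PySem.Str.pyGet? "A-I" 0 = some 'A' ∧ PySem.Str.pyGet? "A-I" (-1) = some 'I' ∧
    PySem.Str.pyGet? "J-P" 0 = some 'J' ∧ PySem.Str.pyGet? "J-P" (-1) = some 'P' ∧
    PySem.Str.pyGet? "Q-T" 0 = some 'Q' ∧ PySem.Str.pyGet? "Q-T" (-1) = some 'T' ∧
    PySem.Str.pyGet? "U-Z" 0 = some 'U' ∧ PySem.Str.pyGet? "U-Z" (-1) = some 'Z' := by decide

-- B's table lookup agrees with A's four range tests, for EVERY char
set_option maxRecDepth 40000 in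
lemma pvTable_get (ch : Char) :
    pvTable.get? ch =
      if 'A' ≤ ch ∧ ch ≤ 'I' then some 0
      else if 'J' ≤ ch ∧ ch ≤ 'P' then some 1
      else if 'Q' ≤ ch ∧ ch ≤ 'T' then some 2
      else if 'U' ≤ ch ∧ ch ≤ 'Z' then some 3
      else none := by
  by_cases hc : ch.toNat < 91
  · have key : ∀ n : Fin 91,
        pvTable.get? (Char.ofNat n.1) =
          if 'A' ≤ (Char.ofNat n.1) ∧ (Char.ofNat n.1) ≤ 'I' then some 0
          else if 'J' ≤ (Char.ofNat n.1) ∧ (Char.ofNat n.1) ≤ 'P' then some 1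
          else if 'Q' ≤ (Char.ofNat n.1) ∧ (Char.ofNat n.1) ≤ 'T' then some 2
          else if 'U' ≤ (Char.ofNat n.1) ∧ (Char.ofNat n.1) ≤ 'Z' then some 3
          else none := by decide
    have h2 : Char.ofNat ch.toNat = ch := Char.ofNat_toNat ch
    have := key ⟨ch.toNat, hc⟩
    simpa [h2] using this
  · -- ch is above 'Z': every test is false and ch is none of the 26 keys
    have hle : ∀ u : Char, u.toNat ≤ 90 → ¬ (ch ≤ u) := by
      intro u hu hle
      rw [Char.le_def, UInt32.le_iff_toNat_le] at hle
      simp only [Char.toNat_val] at hle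
      omega
    have hne : ∀ u : Char, u.toNat ≤ 90 → ¬ (u = ch) := by
      intro u hu h
      subst h
      omega
    rw [pvTable_eq]
    rw [if_neg (fun h => hle 'I' (by decide) h.2),
        if_neg (fun h => hle 'P' (by decide) h.2),
        if_neg (fun h => hle 'T' (by decide) h.2),
        if_neg (fun h => hle 'Z' (by decide) h.2)]
    simp only [PySem.Dict.get?_mk_cons]
    simp [hne 'A' (by decide), hne 'B' (by decide), hne 'C' (by decide), hne 'D' (by decide),
          hne 'E' (by decide), hne 'F' (by decide), hne 'G' (by decide), hne 'H' (by decide),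
          hne 'I' (by decide), hne 'J' (by decide), hne 'K' (by decide), hne 'L' (by decide),
          hne 'M' (by decide), hne 'N' (by decide), hne 'O' (by decide), hne 'P' (by decide),
          hne 'Q' (by decide), hne 'R' (by decide), hne 'S' (by decide), hne 'T' (by decide),
          hne 'U' (by decide), hne 'V' (by decide), hne 'W' (by decide), hne 'X' (by decide),
          hne 'Y' (by decide), hne 'Z' (by decide), PySem.Dict.get?]

-- the dict state A maintains, as a function of B's four counters
def pvDict4 (a b c d : Int) : PySem.Dict String Int :=
  PySem.Dict.mk [("A-I", a), ("J-P", b), ("Q-T", c), ("U-Z", d)]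

-- one loop iteration: A's dict update matches B's counter update
lemma pvStep_corr (e : String) (a b c d : Int) :
    ∃ a' b' c' d',
      pvStepA (pvDict4 a b c d) e = pvDict4 a' b' c' d' ∧
      pvStepB [a, b, c, d] e = [a', b', c', d'] := by
  unfold pvStepA pvStepB
  cases h1 : PySem.List.pyGet? (PySem.Str.split₀ e) (-1) with
  | none => exact ⟨a, b, c, d, by simp only [h1], rfl⟩
  | some surname =>
    simp only [h1]
    cases h2 : PySem.Str.pyGet? surname 0 with
    | none =>
      refine ⟨a, b, c, d, ?_, by simp only [h2]⟩
      simp [pvDict4, PySem.Dict.keys, List.foldl, h2]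
    | some ch =>
      simp only [pvTable_get ch]
      by_cases hA : 'A' ≤ ch ∧ ch ≤ 'I'
      · refine ⟨a + 1, b, c, d, ?_, ?_⟩
        · simp [pvDict4, PySem.Dict.keys, List.foldl, pvLit, PySem.List.pyGet?_neg_one, hA,
                show ¬ ('J' ≤ ch ∧ ch ≤ 'P') from fun h => absurd (le_trans h.1 hA.2) (by decide),
                show ¬ ('Q' ≤ ch ∧ ch ≤ 'T') from fun h => absurd (le_trans h.1 hA.2) (by decide),
                show ¬ ('U' ≤ ch ∧ ch ≤ 'Z') from fun h => absurd (le_trans h.1 hA.2) (by decide),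
                PySem.Dict.modify, PySem.Dict.get?, PySem.Dict.getD, PySem.Dict.insert]
        · simp [hA, PySem.List.pySetD, PySem.List.pySet?, PySem.List.pyGetD, PySem.List.pyGet?, PySem.List.pyIdx?]
      · by_cases hB : 'J' ≤ ch ∧ ch ≤ 'P'
        · refine ⟨a, b + 1, c, d, ?_, ?_⟩
          · simp [pvDict4, PySem.Dict.keys, List.foldl, pvLit, PySem.List.pyGet?_neg_one, hA, hB,
                  show ¬ ('Q' ≤ ch ∧ ch ≤ 'T') from fun h => absurd (le_trans h.1 hB.2) (by decide),
                  show ¬ ('U' ≤ ch ∧ ch ≤ 'Z') from fun h => absurd (le_trans h.1 hB.2) (by decide),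
                  PySem.Dict.modify, PySem.Dict.get?, PySem.Dict.getD, PySem.Dict.insert]
          · simp [hA, hB, PySem.List.pySetD, PySem.List.pySet?, PySem.List.pyGetD, PySem.List.pyGet?, PySem.List.pyIdx?]
        · by_cases hC : 'Q' ≤ ch ∧ ch ≤ 'T'
          · refine ⟨a, b, c + 1, d, ?_, ?_⟩
            · simp [pvDict4, PySem.Dict.keys, List.foldl, pvLit, PySem.List.pyGet?_neg_one, hA, hB, hC,
                    show ¬ ('U' ≤ ch ∧ ch ≤ 'Z') from fun h => absurd (le_trans h.1 hC.2) (by decide),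
                    PySem.Dict.modify, PySem.Dict.get?, PySem.Dict.getD, PySem.Dict.insert]
            · simp [hA, hB, hC, PySem.List.pySetD, PySem.List.pySet?, PySem.List.pyGetD, PySem.List.pyGet?, PySem.List.pyIdx?]
          · by_cases hD : 'U' ≤ ch ∧ ch ≤ 'Z'
            · refine ⟨a, b, c, d + 1, ?_, ?_⟩
              · simp [pvDict4, PySem.Dict.keys, List.foldl, pvLit, PySem.List.pyGet?_neg_one, hA, hB, hC, hD,
                      PySem.Dict.modify, PySem.Dict.get?, PySem.Dict.getD, PySem.Dict.insert]
              · simp [hA, hB, hC, hD, PySem.List.pySetD, PySem.List.pySet?, PySem.List.pyGetD, PySem.List.pyGet?, PySem.List.pyIdx?]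
            · refine ⟨a, b, c, d, ?_, ?_⟩
              · simp [pvDict4, PySem.Dict.keys, List.foldl, pvLit, PySem.List.pyGet?_neg_one, hA, hB, hC, hD]
              · simp [hA, hB, hC, hD, PySem.List.pySetD, PySem.List.pySet?, PySem.List.pyGetD, PySem.List.pyGet?, PySem.List.pyIdx?]

-- the whole loop, by induction, carrying the four counters
lemma pvFold_corr (xs : List String) : ∀ a b c d : Int,
    (xs.foldl pvStepA (pvDict4 a b c d)).items =
      (PySem.List.enumerate pvNames 0).map
        (fun p => (p.2, PySem.List.pyGetD (xs.foldl pvStepB [a, b, c, d]) p.1 0)) := by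
  induction xs with
  | nil =>
    intro a b c d
    simp [pvDict4, pvNames, PySem.List.enumerate,
          PySem.List.pyGetD, PySem.List.pyGet?, PySem.List.pyIdx?]
  | cons e xs ih =>
    intro a b c d
    obtain ⟨a', b', c', d', hA, hB⟩ := pvStep_corr e a b c d
    simp only [List.foldl_cons, hA, hB, ih]

-- ===== VERDICT (by name: the statement is the Claim_ definition above) =====
theorem group_by_surname_spec : Claim_equal_group_by_surname := by
  intro xs _ _
  unfold Spec_group_by_surname group_by_surname group_by_surname_alt
  exact pvFold_corr xs 0 0 0 0
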